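-- pv_equiv track=rewrite | github.com/jiggyjiggy/Algorithm-practice | programers/코테 고득점 kit/sort/K번째 수.py | solution
-- ===== SOURCE A (Python) =====
-- def solution(array, commands):
--
--     answer = []
--     for command in commands:
--       start = command[0] - 1
--       end = command[1]
--       select = command[2] - 1
--       slice_arr = array[start:end]
--       slice_arr.sort()
--       answer.append(slice_arr[select])
--
--     return answer
-- ===== SOURCE B (Python) =====
-- def _ins(top, x):
--     # insert x into the ascending list top, keeping it ascending
--     for j in range(len(top)):
--         if x < top[j]:
--             return top[:j] + [x] + top[j:]
--     return top + [x]
--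
--
-- def solution(array, commands):
--     answer = []
--     for c in commands:
--         k = c[2]
--         top = []  # the k smallest elements seen so far, in ascending order
--         for x in array[c[0] - 1:c[1]]:
--             top = _ins(top, x)
--             if len(top) > k:
--                 top.pop()
--         answer.append(top[-1])
--     return answer
-- ===== Notes on version B (the rewrite author's own statement) =====
-- stated objective: alternative
-- what changed: Instead of copying each sub-range, fully sorting it and indexing, B makes one pass over the sub-range maintaining an ascending buffer of only the k smallest elements seen so far (bounded insertion selection) and returns the buffer's last element.
-- outside the precondition, e.g. on solution([5, 3], [[1, 2, 0]]): A returns [5], B raises IndexError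
import Mathlib
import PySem

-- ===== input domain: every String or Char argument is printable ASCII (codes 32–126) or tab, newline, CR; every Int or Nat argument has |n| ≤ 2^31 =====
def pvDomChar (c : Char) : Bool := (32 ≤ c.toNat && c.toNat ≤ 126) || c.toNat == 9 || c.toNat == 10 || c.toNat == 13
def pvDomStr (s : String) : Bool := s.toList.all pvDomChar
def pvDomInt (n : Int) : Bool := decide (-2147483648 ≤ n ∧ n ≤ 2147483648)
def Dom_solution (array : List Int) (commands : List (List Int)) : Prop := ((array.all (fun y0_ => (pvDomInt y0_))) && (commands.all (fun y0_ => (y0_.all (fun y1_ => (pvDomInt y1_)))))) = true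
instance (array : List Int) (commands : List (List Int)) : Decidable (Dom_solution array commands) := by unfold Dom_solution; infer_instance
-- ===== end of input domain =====

-- B replaces the full sort of each sub-range by a one-pass bounded selection buffer; same return value on Pre_.

-- ===== PORT A =====
-- answer = []; for command in commands: slice, sort, index; return answer
def solution (array : List Int) (commands : List (List Int)) : List Int :=
  commands.foldl (fun answer command =>
    let start := (PySem.List.pyGet? command 0).getD 0 - 1
    let stop := (PySem.List.pyGet? command 1).getD 0
    let select := (PySem.List.pyGet? command 2).getD 0 - 1
    let slice_arr := PySem.List.slice array (some start) (some stop)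
    let sorted_arr := PySem.List.sorted slice_arr (fun x => x) false
    answer ++ [(PySem.List.pyGet? sorted_arr select).getD 0]) []

-- ===== PORT B =====
-- _ins: insert x into the ascending list top, keeping it ascending (first position where x < top[j])
def insAsc (top : List Int) (x : Int) : List Int :=
  match top with
  | [] => [x]
  | y :: ys => if x < y then x :: y :: ys else y :: insAsc ys x

-- for each command: one pass over the sub-range keeping the k smallest seen so far; append buffer's last element
def solution_alt (array : List Int) (commands : List (List Int)) : List Int :=
  commands.foldl (fun answer c =>
    let k := (PySem.List.pyGet? c 2).getD 0
    let top := (PySem.List.slice array (some ((PySem.List.pyGet? c 0).getD 0 - 1))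
                  (some ((PySem.List.pyGet? c 1).getD 0))).foldl
      (fun top x =>
        let t := insAsc top x
        if (t.length : Int) > k then t.dropLast else t) []
    answer ++ [(PySem.List.pyGet? top (-1)).getD 0]) []

-- ===== PRECONDITION & SPEC =====
-- Pre_ excludes commands shorter than 3 entries or whose k-index falls outside the sub-range
-- (there A raises IndexError, except when 0 ≥ command[2] > -len(slice): then A's negative-index
-- wraparound accidentally returns a large element while B's buffer is empty and raises).
def Pre_solution (array : List Int) (commands : List (List Int)) : Prop :=
  ∀ c ∈ commands, 3 ≤ c.length ∧ 1 ≤ c.getD 2 0 ∧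
    c.getD 2 0 ≤ ((PySem.List.slice array (some (c.getD 0 0 - 1)) (some (c.getD 1 0))).length : Int)
instance (array : List Int) (commands : List (List Int)) : Decidable (Pre_solution array commands) := by
  unfold Pre_solution; infer_instance

def pvWitness_solution : List Int × List (List Int) := ([3, 1, 2], [[1, 3, 2]])

def Spec_solution (array : List Int) (commands : List (List Int)) (out : List Int) : Prop := out = solution_alt array commands
instance (array : List Int) (commands : List (List Int)) (out : List Int) : Decidable (Spec_solution array commands out) := by unfold Spec_solution; infer_instance

-- ===== CLAIM (what is proved, stated in full; the proofs are below) =====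
def Claim_equal_solution : Prop := ∀ (array : List Int) (commands : List (List Int)), Dom_solution array commands → Pre_solution array commands → Spec_solution array commands (solution array commands)

-- ===== LEMMAS AND PROOFS =====

theorem insAsc_perm (top : List Int) (x : Int) : (insAsc top x).Perm (top ++ [x]) := by
  induction top with
  | nil => simp [insAsc]
  | cons y ys ih =>
      simp only [insAsc]
      split
      · exact List.Perm.trans (List.Perm.refl _) (by
          simpa using (List.perm_append_comm (l₁ := [x]) (l₂ := y :: ys)))
      · simpa using ih.cons y

theorem insAsc_sorted (top : List Int) (x : Int) (h : top.Pairwise (· ≤ ·)) :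
    (insAsc top x).Pairwise (· ≤ ·) := by
  induction top with
  | nil => simp [insAsc]
  | cons y ys ih =>
      simp only [insAsc]
      rcases List.pairwise_cons.mp h with ⟨hy, hys⟩
      split
      · rename_i hxy
        refine List.pairwise_cons.mpr ⟨?_, h⟩
        intro z hz
        rcases List.mem_cons.mp hz with hz | hz
        · omega
        · exact le_trans (le_of_lt hxy) (hy _ hz)
      · rename_i hxy
        refine List.pairwise_cons.mpr ⟨?_, ih hys⟩
        intro z hz
        have := (insAsc_perm ys x).mem_iff.mp hz
        rcases List.mem_append.mp this with hz | hz
        · exact hy _ hz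
        · have hz' : z = x := by simpa using hz
          omega

-- sorted (p ++ [x]) is insAsc applied to sorted p
theorem sorted_append_singleton (p : List Int) (x : Int) :
    PySem.List.sorted (p ++ [x]) (fun v => v) false
      = insAsc (PySem.List.sorted p (fun v => v) false) x := by
  apply PySem.List.sorted_id_eq_of_perm_of_pairwise
  · exact (insAsc_perm _ _).trans
      (List.Perm.append_right [x] (PySem.List.sorted_perm ..))
  · exact insAsc_sorted _ _ (by simpa using PySem.List.sorted_pairwise p (fun v => v))

-- inserting into a truncated list agrees with truncating the insertion
theorem insAsc_take (s : List Int) (x : Int) (k : ℕ) :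
    (insAsc (s.take k) x).take k = (insAsc s x).take k := by
  induction s generalizing k with
  | nil => simp
  | cons y ys ih =>
      cases k with
      | zero => simp
      | succ k =>
          simp only [List.take_succ_cons, insAsc]
          split
          · cases k <;> simp [List.take_succ_cons, List.take_take]
          · simp only [List.take, ih k]

-- the buffer invariant: after folding a list l, the buffer is (sorted l).take k
theorem buffer_inv (l : List Int) (k : Int) :
    l.foldl (fun top x =>
        let t := insAsc top x
        if (t.length : Int) > k then t.dropLast else t) []
      = (PySem.List.sorted l (fun v => v) false).take k.toNat := by
  suffices h : ∀ (l p : List Int),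
      l.foldl (fun top x =>
          let t := insAsc top x
          if (t.length : Int) > k then t.dropLast else t)
        ((PySem.List.sorted p (fun v => v) false).take k.toNat)
      = (PySem.List.sorted (p ++ l) (fun v => v) false).take k.toNat by
    have h0 : PySem.List.sorted ([] : List Int) (fun v => v) false = [] := rfl
    have := h l []
    rw [h0] at this
    simpa using this
  intro l
  induction l with
  | nil => simp
  | cons x xs ih =>
      intro p
      have hstep :
          (let t := insAsc ((PySem.List.sorted p (fun v => v) false).take k.toNat) x
           if (t.length : Int) > k then t.dropLast else t)
          = (PySem.List.sorted (p ++ [x]) (fun v => v) false).take k.toNat := by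
        rw [sorted_append_singleton]
        set s := PySem.List.sorted p (fun v => v) false with hs
        rcases (by omega : k ≤ 0 ∨ 0 < k) with hk0 | hk0
        · have ht : k.toNat = 0 := Int.toNat_of_nonpos hk0
          simp only [ht, List.take_zero, insAsc]
          rw [if_pos (by simp; omega)]
          rfl
        simp only
        split
        · rename_i hlen
          -- length of insAsc (s.take k.toNat) x exceeds k, so it is exactly k.toNat + 1
          have hl : (insAsc (s.take k.toNat) x).length = (s.take k.toNat).length + 1 := by
            have : ∀ (t : List Int), (insAsc t x).length = t.length + 1 := by
              intro t; induction t with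
              | nil => simp [insAsc]
              | cons y ys ihh => simp only [insAsc]; split <;> simp [ihh]
            exact this _
          have hk0' : 0 ≤ k := le_of_lt hk0
          have hklen : (s.take k.toNat).length = k.toNat := by
            by_contra hne
            have hlt : (s.take k.toNat).length < k.toNat := by
              have := List.length_take_le k.toNat s; omega
            have : (insAsc (s.take k.toNat) x).length ≤ k.toNat := by omega
            have : ((insAsc (s.take k.toNat) x).length : Int) ≤ k := by
              calc ((insAsc (s.take k.toNat) x).length : Int) ≤ (k.toNat : Int) := by exact_mod_cast this
                _ = k := Int.toNat_of_nonneg hk0'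
            omega
          have : (insAsc (s.take k.toNat) x).dropLast
              = (insAsc (s.take k.toNat) x).take k.toNat := by
            rw [List.dropLast_eq_take, hl, hklen]
            simp
          rw [this, insAsc_take]
        · rename_i hlen
          rw [not_lt] at hlen
          -- buffer below capacity: s.take = s and no truncation needed
          have hk0' : 0 ≤ k := le_of_lt hk0
          have hlt : ((insAsc (s.take k.toNat) x).length : Int) ≤ k := hlen
          have hlen' : (insAsc (s.take k.toNat) x).length ≤ k.toNat := by
            have := Int.toNat_of_nonneg hk0'
            omega
          rw [← insAsc_take s x k.toNat]
          exact (List.take_of_length_le hlen').symm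
      simp only [List.foldl_cons]
      rw [hstep, ih (p ++ [x]), List.append_assoc]
      rfl

-- agreement of the two per-command values under Pre_
theorem per_command (array : List Int) (c : List Int)
    (h3 : 3 ≤ c.length) (h1 : 1 ≤ c.getD 2 0)
    (h2 : c.getD 2 0 ≤ ((PySem.List.slice array (some (c.getD 0 0 - 1)) (some (c.getD 1 0))).length : Int)) :
    (PySem.List.pyGet?
        (PySem.List.sorted
          (PySem.List.slice array (some ((PySem.List.pyGet? c 0).getD 0 - 1))
            (some ((PySem.List.pyGet? c 1).getD 0))) (fun x => x) false)
        ((PySem.List.pyGet? c 2).getD 0 - 1)).getD 0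
    = (PySem.List.pyGet?
        ((PySem.List.slice array (some ((PySem.List.pyGet? c 0).getD 0 - 1))
            (some ((PySem.List.pyGet? c 1).getD 0))).foldl
          (fun top x =>
            let t := insAsc top x
            if (t.length : Int) > (PySem.List.pyGet? c 2).getD 0 then t.dropLast else t) [])
        (-1)).getD 0 := by
  match c, h3 with
  | a :: b :: kk :: rest, _ =>
    have ha : (PySem.List.pyGet? (a :: b :: kk :: rest) 0).getD 0 = a := by
      simp only [PySem.List.pyGet?, PySem.List.pyIdx?]
      split
      · split
        · simp
        · exfalso; omega
      · exfalso; omega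
    have hb : (PySem.List.pyGet? (a :: b :: kk :: rest) 1).getD 0 = b := by
      simp only [PySem.List.pyGet?, PySem.List.pyIdx?]
      split
      · split
        · simp
        · exfalso; omega
      · exfalso; omega
    have hk : (PySem.List.pyGet? (a :: b :: kk :: rest) 2).getD 0 = kk := by
      simp only [PySem.List.pyGet?, PySem.List.pyIdx?]
      split
      · split
        · simp
        · exfalso; omega
      · exfalso; omega
    simp only [List.getD, List.getElem?_cons_succ, List.getElem?_cons_zero, Option.getD_some] at h1 h2
    rw [ha, hb, hk]
    rw [buffer_inv]
    set s := PySem.List.sorted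
      (PySem.List.slice array (some (a - 1)) (some b)) (fun x => x) false with hs
    have hslen : (s.length : Int)
        = ((PySem.List.slice array (some (a - 1)) (some b)).length : Int) := by
      simp [hs, PySem.List.length_sorted]
    have hk1 : 1 ≤ kk := h1
    have hkle : kk ≤ (s.length : Int) := by omega
    have hkn : kk.toNat ≤ s.length := by omega
    have hkn1 : 1 ≤ kk.toNat := by omega
    have hlen_take : (s.take kk.toNat).length = kk.toNat := by
      simp [List.length_take]; omega
    -- RHS: last element of s.take kk.toNat
    have hR : PySem.List.pyGet? (s.take kk.toNat) (-1) = (s.take kk.toNat)[kk.toNat - 1]? := by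
      have := PySem.List.pyGet?_neg_natCast (xs := s.take kk.toNat) (k := 1)
        (by omega) (by omega)
      simpa [hlen_take] using this
    -- LHS: element kk - 1 of s
    have hL : PySem.List.pyGet? s (kk - 1) = s[(kk - 1).toNat]? := by
      apply PySem.List.pyGet?_of_nonneg
      omega
    rw [hR, hL]
    have hidx : (kk - 1).toNat = kk.toNat - 1 := by omega
    rw [hidx, List.getElem?_take]
    have : kk.toNat - 1 < kk.toNat := by omega
    simp [this]

theorem foldl_snoc_congr (f g : List Int → Int) (l : List (List Int)) (acc : List Int)
    (h : ∀ c ∈ l, f c = g c) :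
    l.foldl (fun a c => a ++ [f c]) acc = l.foldl (fun a c => a ++ [g c]) acc := by
  induction l generalizing acc with
  | nil => rfl
  | cons c cs ih =>
      simp only [List.foldl_cons, h c (by simp)]
      exact ih _ (fun d hd => h d (by simp [hd]))

-- ===== VERDICT (by name: the statement is the Claim_ definition above) =====
theorem solution_spec : Claim_equal_solution := by
  intro array commands _ hpre
  unfold Spec_solution solution solution_alt
  refine foldl_snoc_congr _ _ commands [] ?_
  intro c hc
  obtain ⟨h3, h1, h2⟩ := hpre c hc
  exact per_command array c h3 h1 h2
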